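-- pv_equiv track=rewrite | github.com/logsem/cerise | word_count.py | coqproject_parse
-- ===== SOURCE A (Python) =====
-- def coqproject_parse(cp_file):
--     cur_category = ""
--     file_categories = {}
--     for line in cp_file:
--         line = line.strip()
--         if line.startswith("#") or line == "":
--             pass
--         elif line.startswith("@"):
--             cur_category = line[1:]
--             file_categories[cur_category] = []
--         else:
--             ##TODO: add filters for sections/Lemmas
--             if cur_category:
--                 file_categories[cur_category] += [line]
--     return file_categories
-- ===== SOURCE B (Python) =====
-- def coqproject_parse(cp_file):
--     # Pass 1: strip all lines and drop blanks and comments.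
--     lines = [l for l in (s.strip() for s in cp_file) if l and not l.startswith("#")]
--     d = {}
--     i = 0
--     n = len(lines)
--     # Pass 2: consume one '@'-header-led segment at a time.
--     while i < n:
--         head = lines[i]
--         i += 1
--         if head.startswith("@"):
--             seg = []
--             while i < n and not lines[i].startswith("@"):
--                 seg.append(lines[i])
--                 i += 1
--             d[head[1:]] = seg
--     return d
-- ===== Notes on version B (the rewrite author's own statement) =====
-- stated objective: alternative
-- what changed: B replaces A's single pass with running cur_category state by a filter-first pass (strip, drop blanks/comments) followed by a segment-splitting pass that slices the lines between consecutive '@' headers and assigns each segment to its header's name at once.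
-- intended difference: On files whose last bare '@' header (a line stripping to exactly '@') is followed by content lines before any further header, A maps key '' to an empty list and silently drops those lines (its `if cur_category:` guard is falsy), while B collects them under key ''; keeping the anonymously-named block's files is the intended behaviour. — e.g. on coqproject_parse(["@", "x"]): A returns [("", [])], B returns [("", ["x"])]
import Mathlib
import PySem

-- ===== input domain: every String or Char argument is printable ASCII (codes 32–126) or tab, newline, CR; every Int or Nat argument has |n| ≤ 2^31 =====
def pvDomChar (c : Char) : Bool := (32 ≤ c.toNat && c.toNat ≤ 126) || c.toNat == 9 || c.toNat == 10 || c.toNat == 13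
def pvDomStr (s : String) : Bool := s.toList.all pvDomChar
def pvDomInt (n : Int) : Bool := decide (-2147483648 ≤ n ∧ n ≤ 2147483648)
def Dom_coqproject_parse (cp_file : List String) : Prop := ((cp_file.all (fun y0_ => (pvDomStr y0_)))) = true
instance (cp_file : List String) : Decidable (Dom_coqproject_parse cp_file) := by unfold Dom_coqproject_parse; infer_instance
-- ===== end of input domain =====

-- B parses by filtering blanks/comments first and then splitting at '@' headers instead of A's
-- running-state loop (alternative decomposition, no speed claim); on files whose last bare '@'
-- header is followed by content lines, B keeps those lines under the empty name where A drops them.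

-- ===== PORT A =====
def aStep (st : String × PySem.Dict String (List String)) (line : String) :
    String × PySem.Dict String (List String) :=
  let l := PySem.Str.strip line
  if PySem.Str.startswith l "#" || l == "" then st
  else if PySem.Str.startswith l "@" then
    let name := PySem.Str.slice l (some 1) none
    (name, st.2.insert name [])
  else if st.1 ≠ "" then (st.1, st.2.insert st.1 (st.2.getD st.1 [] ++ [l]))
  else st

def coqproject_parse (cp_file : List String) : List (String × List String) :=
  (cp_file.foldl aStep ("", PySem.Dict.empty)).2.items

-- ===== PORT B =====
def bKeep (l : String) : Bool := l != "" && !PySem.Str.startswith l "#"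

def bGo : List String → PySem.Dict String (List String) → PySem.Dict String (List String)
  | [], d => d
  | head :: rest, d =>
    if PySem.Str.startswith head "@" then
      let seg := rest.takeWhile (fun x => !PySem.Str.startswith x "@")
      let rest' := rest.dropWhile (fun x => !PySem.Str.startswith x "@")
      bGo rest' (d.insert (PySem.Str.slice head (some 1) none) seg)
    else bGo rest d
termination_by xs _ => xs.length
decreasing_by
  · exact Nat.lt_succ_of_le (rest.length_dropWhile_le _)
  · exact Nat.lt_succ_self _

def coqproject_parse_alt (cp_file : List String) : List (String × List String) :=
  (bGo ((cp_file.map PySem.Str.strip).filter bKeep) PySem.Dict.empty).items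

-- ===== PRECONDITION & SPEC =====
-- On files whose last line stripping to exactly '@' (a bare header) is followed by lines with
-- content before any further header, A maps key '' to an empty list and silently drops that
-- content (its `if cur_category:` guard is falsy), while B collects it under key '' — keeping
-- the anonymously-named block's files is the intended behaviour, not discarding them.
def D_coqproject_parse (cp_file : List String) : Prop :=
  ∃ s ∈ (cp_file.map PySem.Str.strip).tails,
    s.head? = some "@" ∧ "@" ∉ s.tail ∧
      ∃ x ∈ s.tail.head?, PySem.Str.startswith x "@" = false
instance (cp_file : List String) : Decidable (D_coqproject_parse cp_file) := by
  unfold D_coqproject_parse; infer_instance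

def Spec_coqproject_parse (cp_file : List String) (out : List (String × List String)) : Prop :=
  ¬ D_coqproject_parse cp_file → out = coqproject_parse_alt cp_file
instance (cp_file : List String) (out : List (String × List String)) : Decidable (Spec_coqproject_parse cp_file out) := by unfold Spec_coqproject_parse; infer_instance

def pvDiffWitness_coqproject_parse : List String := ["@", "x"]
def pvDiffWitnessOut_coqproject_parse :
    (List (String × List String)) × (List (String × List String)) :=
  ([("", [])], [("", ["x"])])

-- ===== CLAIM (what is proved, stated in full; the proofs are below) =====
def Claim_unchanged_coqproject_parse : Prop := ∀ (cp_file : List String), Dom_coqproject_parse cp_file → Spec_coqproject_parse cp_file (coqproject_parse cp_file)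
def Claim_changed_coqproject_parse : Prop := Dom_coqproject_parse (pvDiffWitness_coqproject_parse) ∧ D_coqproject_parse (pvDiffWitness_coqproject_parse) ∧ coqproject_parse (pvDiffWitness_coqproject_parse) = pvDiffWitnessOut_coqproject_parse.1 ∧ coqproject_parse_alt (pvDiffWitness_coqproject_parse) = pvDiffWitnessOut_coqproject_parse.2 ∧ pvDiffWitnessOut_coqproject_parse.1 ≠ pvDiffWitnessOut_coqproject_parse.2

-- ===== LEMMAS AND PROOFS =====

-- D_'s formula under a name, for the proofs below (definitionally D_ applied to the kept lines).
def pvDks (ks : List String) : Prop :=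
  ∃ s ∈ ks.tails, s.head? = some "@" ∧ "@" ∉ s.tail ∧
    s.tail.takeWhile (fun x => !PySem.Str.startswith x "@") ≠ []

theorem pvDks_mono {s t : List String} (hsuf : s <:+ t) : pvDks s → pvDks t := by
  rintro ⟨u, hu, h⟩
  exact ⟨u, (List.mem_tails u t).mpr (((List.mem_tails u s).mp hu).trans hsuf), h⟩

-- A's step on a line that is already stripped and kept (non-blank, not a comment).
def stepK (st : String × PySem.Dict String (List String)) (l : String) :
    String × PySem.Dict String (List String) :=
  if PySem.Str.startswith l "@" then
    let name := PySem.Str.slice l (some 1) none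
    (name, st.2.insert name [])
  else if st.1 ≠ "" then (st.1, st.2.insert st.1 (st.2.getD st.1 [] ++ [l]))
  else st

theorem stepK_hdr (st : String × PySem.Dict String (List String)) (l : String)
    (h : PySem.Str.startswith l "@" = true) :
    stepK st l = (PySem.Str.slice l (some 1) none,
      st.2.insert (PySem.Str.slice l (some 1) none) []) := by
  unfold stepK
  rw [if_pos h]

theorem stepK_nonhdr_cur (st : String × PySem.Dict String (List String)) (l : String)
    (h : PySem.Str.startswith l "@" = false) (hcur : st.1 ≠ "") :
    stepK st l = (st.1, st.2.insert st.1 (st.2.getD st.1 [] ++ [l])) := by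
  unfold stepK
  rw [if_neg (by rw [h]; exact Bool.false_ne_true), if_pos hcur]

theorem stepK_nonhdr_nil (d : PySem.Dict String (List String)) (l : String)
    (h : PySem.Str.startswith l "@" = false) :
    stepK ("", d) l = ("", d) := by
  unfold stepK
  rw [if_neg (by rw [h]; exact Bool.false_ne_true), if_neg (by exact fun hc => hc rfl)]

theorem bGo_nil (d : PySem.Dict String (List String)) : bGo [] d = d := by
  rw [bGo]

theorem bGo_cons (l : String) (rest : List String) (d : PySem.Dict String (List String)) :
    bGo (l :: rest) d =
      if PySem.Str.startswith l "@" then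
        bGo (rest.dropWhile (fun x => !PySem.Str.startswith x "@"))
          (d.insert (PySem.Str.slice l (some 1) none)
            (rest.takeWhile (fun x => !PySem.Str.startswith x "@")))
      else bGo rest d := by
  rw [bGo]

theorem bKeep_eq (l : String) :
    bKeep l = !(PySem.Str.startswith l "#" || l == "") := by
  unfold bKeep bne
  cases h1 : PySem.Str.startswith l "#" <;> cases h2 : l == "" <;> rfl

theorem aStep_skip (st : String × PySem.Dict String (List String)) (x : String)
    (h : bKeep (PySem.Str.strip x) = false) : aStep st x = st := by
  have hc : (PySem.Str.startswith (PySem.Str.strip x) "#" || PySem.Str.strip x == "") = true := by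
    have h2 := bKeep_eq (PySem.Str.strip x)
    rw [h] at h2
    cases hb : (PySem.Str.startswith (PySem.Str.strip x) "#" || PySem.Str.strip x == "")
    · rw [hb] at h2; exact absurd h2 (by decide)
    · rfl
  unfold aStep
  rw [if_pos hc]

theorem aStep_keep (st : String × PySem.Dict String (List String)) (x : String)
    (h : bKeep (PySem.Str.strip x) = true) : aStep st x = stepK st (PySem.Str.strip x) := by
  have hc : (PySem.Str.startswith (PySem.Str.strip x) "#" || PySem.Str.strip x == "") = false := by
    have h2 := bKeep_eq (PySem.Str.strip x)
    rw [h] at h2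
    cases hb : (PySem.Str.startswith (PySem.Str.strip x) "#" || PySem.Str.strip x == "")
    · rfl
    · rw [hb] at h2; exact absurd h2 (by decide)
  unfold aStep stepK
  rw [if_neg (by rw [hc]; exact Bool.false_ne_true)]

theorem foldA_filter (xs : List String) (st : String × PySem.Dict String (List String)) :
    xs.foldl aStep st = ((xs.map PySem.Str.strip).filter bKeep).foldl stepK st := by
  induction xs generalizing st with
  | nil => rfl
  | cons x xs ih =>
      rw [List.foldl_cons, List.map_cons, List.filter_cons]
      cases hk : bKeep (PySem.Str.strip x)
      · rw [if_neg (by decide), aStep_skip st x hk, ih]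
      · rw [if_pos rfl, List.foldl_cons, aStep_keep st x hk, ih]

theorem seg_fold (name : String) (hname : name ≠ "") (seg : List String) :
    ∀ (d : PySem.Dict String (List String)) (acc : List String),
    (∀ x ∈ seg, PySem.Str.startswith x "@" = false) →
    seg.foldl stepK (name, d.insert name acc) = (name, d.insert name (acc ++ seg)) := by
  induction seg with
  | nil => intro d acc _; rw [List.foldl_nil, List.append_nil]
  | cons x seg ih =>
      intro d acc h
      have hx : PySem.Str.startswith x "@" = false := h x (by simp)
      rw [List.foldl_cons, stepK_nonhdr_cur (name, d.insert name acc) x hx hname]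
      show seg.foldl stepK (name, (d.insert name acc).insert name
        ((d.insert name acc).getD name [] ++ [x])) = _
      rw [PySem.Dict.getD_insert_self, PySem.Dict.insert_insert_self,
        ih d (acc ++ [x]) (fun y hy => h y (by simp [hy])),
        List.append_assoc, List.singleton_append]

theorem skip_fold (seg : List String) :
    ∀ (d : PySem.Dict String (List String)),
    (∀ x ∈ seg, PySem.Str.startswith x "@" = false) →
    seg.foldl stepK ("", d) = ("", d) := by
  induction seg with
  | nil => intro d _; rfl
  | cons x seg ih =>
      intro d h
      rw [List.foldl_cons, stepK_nonhdr_nil d x (h x (by simp))]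
      exact ih d (fun y hy => h y (by simp [hy]))

theorem head_dropWhile (p : String → Bool) (xs : List String) (l : String)
    (h : (xs.dropWhile p).head? = some l) : p l = false := by
  induction xs with
  | nil => simp [List.dropWhile] at h
  | cons x xs ih =>
      rw [List.dropWhile_cons] at h
      by_cases hp : p x = true
      · simp [hp] at h; exact ih h
      · simp [hp] at h
        subst h; simpa using hp

theorem bare_head (l : String) (h1 : PySem.Str.startswith l "@" = true)
    (h2 : PySem.Str.slice l (some 1) none = "") : l = "@" := by
  have h1' : ['@'].isPrefixOf l.toList = true := by
    simpa [PySem.Str.startswith, PySem.Chars.startswith] using h1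
  obtain ⟨t, ht⟩ := List.isPrefixOf_iff_prefix.mp h1'
  have h2' : PySem.List.slice l.toList (some 1) none = [] := by
    have := congrArg String.toList h2
    simpa [PySem.Str.slice] using this
  rw [PySem.List.slice_from l.toList (a := 1) (by omega)] at h2'
  have hl : l.toList = ['@'] := by
    rw [← ht] at h2' ⊢
    simp at h2'
    simp [h2']
  have := congrArg String.ofList hl
  rwa [String.ofList_toList] at this

theorem at_not_mem_take (rest : List String) :
    "@" ∉ rest.takeWhile (fun x => !PySem.Str.startswith x "@") := by
  intro hm
  have := List.mem_takeWhile_imp hm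
  simp at this
  exact absurd this (by decide)

theorem at_mem_drop {rest : List String} (h : "@" ∈ rest) :
    "@" ∈ rest.dropWhile (fun x => !PySem.Str.startswith x "@") := by
  rw [← List.takeWhile_append_dropWhile (p := fun x => !PySem.Str.startswith x "@") (l := rest)]
    at h
  rcases List.mem_append.mp h with h' | h'
  · exact absurd h' (at_not_mem_take rest)
  · exact h'

-- Dicts whose items agree in keys and order, and in values everywhere except at key "".
def pvP (p q : String × List String) : Prop := p.1 = q.1 ∧ (p.1 ≠ "" → p.2 = q.2)

def pvRel (d1 d2 : PySem.Dict String (List String)) : Prop :=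
  List.Forall₂ pvP d1.items d2.items

theorem pvRel_refl (d : PySem.Dict String (List String)) : pvRel d d :=
  List.forall₂_same.mpr (fun _ _ => ⟨rfl, fun _ => rfl⟩)

theorem pvP_any (k : String) : ∀ {l1 l2 : List (String × List String)},
    List.Forall₂ pvP l1 l2 → l1.any (fun p => p.1 == k) = l2.any (fun p => p.1 == k) := by
  intro l1 l2 h
  induction h with
  | nil => rfl
  | cons hpq _ ih => simp only [List.any_cons, hpq.1, ih]

theorem pvP_map_ins (k : String) (v w : List String) (hk : k ≠ "" → v = w) :
    ∀ {l1 l2 : List (String × List String)}, List.Forall₂ pvP l1 l2 →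
    List.Forall₂ pvP (l1.map (fun p => if p.1 == k then (k, v) else p))
      (l2.map (fun p => if p.1 == k then (k, w) else p)) := by
  intro l1 l2 h
  induction h with
  | nil => exact List.Forall₂.nil
  | @cons p q t1 t2 hpq htl ih =>
      simp only [List.map_cons]
      refine List.Forall₂.cons ?_ ih
      rw [show (if p.1 == k then (k, v) else p) = (if q.1 == k then (k, v) else p) from by
        rw [hpq.1]]
      cases hc : (q.1 == k)
      · simp only [Bool.false_eq_true, if_false]
        exact hpq
      · simp only [if_true]
        exact ⟨rfl, fun hne => hk hne⟩

theorem pvP_append_single (p q : String × List String) (hpq : pvP p q) :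
    ∀ {l1 l2 : List (String × List String)}, List.Forall₂ pvP l1 l2 →
    List.Forall₂ pvP (l1 ++ [p]) (l2 ++ [q]) := by
  intro l1 l2 h
  induction h with
  | nil => exact List.Forall₂.cons hpq List.Forall₂.nil
  | cons hxy _ ih => exact List.Forall₂.cons hxy ih

theorem pvP_eq : ∀ {l1 l2 : List (String × List String)}, List.Forall₂ pvP l1 l2 →
    (∀ p ∈ l1, p.1 ≠ "") → l1 = l2 := by
  intro l1 l2 h
  induction h with
  | nil => intro _; rfl
  | @cons p q t1 t2 hpq htl ih =>
      intro hall
      have hp : p.1 ≠ "" := hall p (by simp)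
      have hpq' : p = q := Prod.ext hpq.1 (hpq.2 hp)
      rw [hpq', ih (fun r hr => hall r (by simp [hr]))]

theorem pvP_map_eq (v : List String) : ∀ {l1 l2 : List (String × List String)},
    List.Forall₂ pvP l1 l2 →
    l1.map (fun p => if p.1 == "" then ("", v) else p) =
      l2.map (fun p => if p.1 == "" then ("", v) else p) := by
  intro l1 l2 h
  induction h with
  | nil => rfl
  | @cons p q t1 t2 hpq htl ih =>
      simp only [List.map_cons]
      rw [show (if p.1 == "" then (("" : String), v) else p) =
          (if q.1 == "" then (("" : String), v) else p) from by rw [hpq.1], ih]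
      cases hc : (q.1 == "")
      · simp only [Bool.false_eq_true, if_false]
        have hq : q.1 ≠ "" := by simpa using hc
        have hp : p.1 ≠ "" := hpq.1 ▸ hq
        rw [Prod.ext hpq.1 (hpq.2 hp)]
      · simp only [if_true]

theorem pvRel_contains {d1 d2 : PySem.Dict String (List String)} (h : pvRel d1 d2) (k : String) :
    d1.contains k = d2.contains k :=
  pvP_any k h

theorem pvRel_insert {d1 d2 : PySem.Dict String (List String)} (k : String) (v : List String)
    (h : pvRel d1 d2) : pvRel (d1.insert k v) (d2.insert k v) := by
  cases hc : d1.contains k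
  · have hc2 : d2.contains k = false := (pvRel_contains h k) ▸ hc
    unfold pvRel
    rw [PySem.Dict.items_insert_of_not_contains _ _ hc,
      PySem.Dict.items_insert_of_not_contains _ _ hc2]
    exact pvP_append_single (k, v) (k, v) ⟨rfl, fun _ => rfl⟩ h
  · have hc2 : d2.contains k = true := (pvRel_contains h k) ▸ hc
    unfold pvRel
    rw [PySem.Dict.items_insert_of_contains _ _ hc, PySem.Dict.items_insert_of_contains _ _ hc2]
    exact pvP_map_ins k v v (fun _ => rfl) h

theorem pvRel_insert_bare {d1 d2 : PySem.Dict String (List String)} (v w : List String)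
    (h : pvRel d1 d2) : pvRel (d1.insert "" v) (d2.insert "" w) := by
  cases hc : d1.contains ""
  · have hc2 : d2.contains "" = false := (pvRel_contains h "") ▸ hc
    unfold pvRel
    rw [PySem.Dict.items_insert_of_not_contains _ _ hc,
      PySem.Dict.items_insert_of_not_contains _ _ hc2]
    exact pvP_append_single ("", v) ("", w) ⟨rfl, fun hne => absurd rfl hne⟩ h
  · have hc2 : d2.contains "" = true := (pvRel_contains h "") ▸ hc
    unfold pvRel
    rw [PySem.Dict.items_insert_of_contains _ _ hc, PySem.Dict.items_insert_of_contains _ _ hc2]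
    exact pvP_map_ins "" v w (fun hne => absurd rfl hne) h

theorem pvRel_insert_bare_eq {d1 d2 : PySem.Dict String (List String)} (v : List String)
    (h : pvRel d1 d2) : d1.insert "" v = d2.insert "" v := by
  apply PySem.Dict.ext
  cases hc : d1.contains ""
  · have hc2 : d2.contains "" = false := (pvRel_contains h "") ▸ hc
    rw [PySem.Dict.items_insert_of_not_contains _ _ hc,
      PySem.Dict.items_insert_of_not_contains _ _ hc2]
    have hall : ∀ p ∈ d1.items, p.1 ≠ "" := by
      intro p hp hpe
      have hany : d1.items.any (fun p => p.1 == "") = false := hc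
      have h2 := List.any_eq_false.mp hany p hp
      apply h2
      rw [hpe]
      decide
    rw [pvP_eq h hall]
  · have hc2 : d2.contains "" = true := (pvRel_contains h "") ▸ hc
    rw [PySem.Dict.items_insert_of_contains _ _ hc, PySem.Dict.items_insert_of_contains _ _ hc2]
    exact pvP_map_eq v h

theorem pvMain : ∀ (n : Nat) (ks : List String), ks.length ≤ n →
    ∀ (cur : String) (d1 d2 : PySem.Dict String (List String)),
    pvRel d1 d2 → ("@" ∈ ks ∨ d1 = d2) → ¬ pvDks ks →
    (cur ≠ "" → ∀ l, ks.head? = some l → PySem.Str.startswith l "@" = true) →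
    (ks.foldl stepK (cur, d1)).2 = bGo ks d2 := by
  intro n
  induction n with
  | zero =>
      intro ks hlen cur d1 d2 hrel hmem _ _
      have h0 : ks = [] := List.eq_nil_of_length_eq_zero (Nat.le_zero.mp hlen)
      subst h0
      rcases hmem with hm | hm
      · exact absurd hm (List.not_mem_nil)
      · rw [List.foldl_nil, bGo_nil, hm]
  | succ m ih =>
      intro ks hlen cur d1 d2 hrel hmem hD H
      match ks with
      | [] =>
          rcases hmem with hm | hm
          · exact absurd hm (List.not_mem_nil)
          · rw [List.foldl_nil, bGo_nil, hm]
      | l :: rest =>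
        have hrest : rest.length ≤ m := by simpa using hlen
        have hDrest : ¬ pvDks rest := fun h => hD (pvDks_mono (List.suffix_cons l rest) h)
        have hDrest' : ¬ pvDks (rest.dropWhile (fun x => !PySem.Str.startswith x "@")) :=
          fun h => hD (pvDks_mono ((List.dropWhile_suffix _).trans (List.suffix_cons l rest)) h)
        have hdlen : (rest.dropWhile (fun x => !PySem.Str.startswith x "@")).length ≤ m :=
          le_trans (rest.length_dropWhile_le _) hrest
        have hseg : ∀ x ∈ rest.takeWhile (fun x => !PySem.Str.startswith x "@"),
            PySem.Str.startswith x "@" = false := by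
          intro x hx
          have hb := List.mem_takeWhile_imp hx
          cases c : PySem.Str.startswith x "@"
          · rfl
          · rw [c] at hb; exact absurd hb (by decide)
        cases hl : PySem.Str.startswith l "@" with
        | false =>
            have hcur : cur = "" := by
              by_contra hc
              rw [H hc l rfl] at hl
              exact absurd hl (by decide)
            subst hcur
            have hlne : l ≠ "@" := by
              intro hc; rw [hc] at hl; exact absurd hl (by decide)
            rw [List.foldl_cons, stepK_nonhdr_nil d1 l hl, bGo_cons,
              if_neg (by rw [hl]; exact Bool.false_ne_true)]
            refine ih rest hrest "" d1 d2 hrel ?_ hDrest (fun hc => absurd rfl hc)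
            rcases hmem with hm | hm
            · rcases List.mem_cons.mp hm with h' | h'
              · exact absurd h'.symm hlne
              · exact Or.inl h'
            · exact Or.inr hm
        | true =>
            have hdhead : ∀ l', (rest.dropWhile (fun x => !PySem.Str.startswith x "@")).head? =
                some l' → PySem.Str.startswith l' "@" = true := by
              intro l' h'
              have hb := head_dropWhile _ rest l' h'
              cases c : PySem.Str.startswith l' "@"
              · rw [c] at hb; exact absurd hb (by decide)
              · rfl
            rw [List.foldl_cons, stepK_hdr (cur, d1) l hl, bGo_cons, if_pos hl]
            conv_lhs => rw [show rest = rest.takeWhile (fun x => !PySem.Str.startswith x "@") ++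
              rest.dropWhile (fun x => !PySem.Str.startswith x "@") from
              (List.takeWhile_append_dropWhile).symm]
            rw [List.foldl_append]
            by_cases hname : PySem.Str.slice l (some 1) none = ""
            · -- bare '@' header
              have hlq : l = "@" := bare_head l hl hname
              rw [hname, skip_fold _ (d1.insert "" []) hseg]
              by_cases hmem' : "@" ∈ rest.dropWhile (fun x => !PySem.Str.startswith x "@")
              · exact ih _ hdlen "" (d1.insert "" []) _
                  (pvRel_insert_bare _ _ hrel) (Or.inl hmem') hDrest'
                  (fun hc => absurd rfl hc)
              · have hsegnil : rest.takeWhile (fun x => !PySem.Str.startswith x "@") = [] := by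
                  by_contra hne
                  apply hD
                  refine ⟨l :: rest, (List.mem_tails _ _).mpr (List.suffix_refl _), ?_, ?_, ?_⟩
                  · rw [hlq]; rfl
                  · intro hm
                    rw [← List.takeWhile_append_dropWhile
                      (p := fun x => !PySem.Str.startswith x "@") (l := rest)] at hm
                    rcases List.mem_append.mp hm with h' | h'
                    · exact absurd h' (at_not_mem_take rest)
                    · exact hmem' h'
                  · exact hne
                rw [hsegnil] at *
                rw [pvRel_insert_bare_eq [] hrel]
                exact ih _ hdlen "" _ _ (pvRel_refl _) (Or.inr rfl) hDrest'
                  (fun hc => absurd rfl hc)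
            · -- named header
              rw [seg_fold _ hname _ d1 [] hseg, List.nil_append]
              have hlne : l ≠ "@" := by
                intro hc
                rw [hc] at hname
                exact hname (by decide)
              refine ih _ hdlen _ (d1.insert (PySem.Str.slice l (some 1) none) _)
                (d2.insert (PySem.Str.slice l (some 1) none) _)
                (pvRel_insert _ _ hrel) ?_ hDrest' (fun _ => hdhead)
              rcases hmem with hm | hm
              · refine Or.inl (at_mem_drop ?_)
                rcases List.mem_cons.mp hm with h' | h'
                · exact absurd h'.symm hlne
                · exact h'
              · exact Or.inr (by rw [hm])

theorem suffix_filter_lift {p : String → Bool} : ∀ (L : List String) (a : String)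
    (t : List String), (a :: t) <:+ L.filter p → ∃ u, (a :: u) <:+ L ∧ u.filter p = t := by
  intro L
  induction L with
  | nil =>
      intro a t h
      exact absurd (List.suffix_nil.mp h) (by simp)
  | cons x L' ih =>
      intro a t h
      rw [List.filter_cons] at h
      by_cases hp : p x = true
      · rw [if_pos hp] at h
        rcases List.suffix_cons_iff.mp h with h' | h'
        · obtain ⟨ha, ht⟩ := List.cons_eq_cons.mp h'
          subst ha
          exact ⟨L', List.suffix_refl _, ht.symm⟩
        · obtain ⟨u, hu, hf⟩ := ih a t h'
          exact ⟨u, hu.trans (List.suffix_cons x L'), hf⟩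
      · rw [if_neg hp] at h
        obtain ⟨u, hu, hf⟩ := ih a t h
        exact ⟨u, hu.trans (List.suffix_cons x L'), hf⟩

theorem hash_not_at (x : String) (h : PySem.Str.startswith x "#" = true) :
    PySem.Str.startswith x "@" = false := by
  cases c : PySem.Str.startswith x "@"
  · rfl
  · exfalso
    have h1 : ['#'].isPrefixOf x.toList = true := by
      simpa [PySem.Str.startswith, PySem.Chars.startswith] using h
    have h2 : ['@'].isPrefixOf x.toList = true := by
      simpa [PySem.Str.startswith, PySem.Chars.startswith] using c
    obtain ⟨t1, ht1⟩ := List.isPrefixOf_iff_prefix.mp h1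
    obtain ⟨t2, ht2⟩ := List.isPrefixOf_iff_prefix.mp h2
    rw [← ht1] at ht2
    simp at ht2

theorem pvDks_to_D (cp_file : List String) :
    pvDks ((cp_file.map PySem.Str.strip).filter
      (fun l => l != "" && !PySem.Str.startswith l "#")) →
    D_coqproject_parse cp_file := by
  rintro ⟨s, hs, hhead, hnat, hseg⟩
  cases s with
  | nil => simp at hhead
  | cons a t =>
    have ha : a = "@" := by simpa using hhead
    subst ha
    simp only [List.tail_cons] at hnat hseg
    obtain ⟨u, hu, hf⟩ := suffix_filter_lift (cp_file.map PySem.Str.strip) "@" t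
      ((List.mem_tails _ _).mp hs)
    refine ⟨"@" :: u, (List.mem_tails _ _).mpr hu, rfl, ?_, ?_⟩
    · intro hm
      apply hnat
      show "@" ∈ t
      rw [← hf]
      exact List.mem_filter.mpr ⟨hm, by decide⟩
    · cases u with
      | nil =>
          have ht : t = [] := by rw [← hf]; rfl
          rw [ht] at hseg
          simp at hseg
      | cons x u' =>
          refine ⟨x, rfl, ?_⟩
          by_cases hpx : (x != "" && !PySem.Str.startswith x "#") = true
          · have ht : t = x :: u'.filter (fun l => l != "" && !PySem.Str.startswith l "#") := by
              rw [← hf, List.filter_cons, if_pos hpx]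
            rw [ht, List.takeWhile_cons] at hseg
            cases c : PySem.Str.startswith x "@"
            · rfl
            · rw [c] at hseg
              simp at hseg
          · simp only [Bool.and_eq_true, bne_iff_ne, Bool.not_eq_true'] at hpx
            have hpx' : x ≠ "" → PySem.Str.startswith x "#" = true := by
              intro hx
              by_contra hcc
              exact hpx ⟨hx, by simpa using hcc⟩
            by_cases hx : x = ""
            · rw [hx]; decide
            · exact hash_not_at x (hpx' hx)

-- ===== VERDICT (by name: the statement is the Claim_ definition above) =====
theorem coqproject_parse_spec : Claim_unchanged_coqproject_parse := by
  intro cp_file _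
  unfold Spec_coqproject_parse
  intro hnd
  have hnd' : ¬ pvDks ((cp_file.map PySem.Str.strip).filter bKeep) :=
    fun h => hnd (pvDks_to_D cp_file h)
  unfold coqproject_parse coqproject_parse_alt
  rw [foldA_filter]
  congr 1
  exact pvMain _ _ (le_refl _) "" PySem.Dict.empty PySem.Dict.empty
    (pvRel_refl _) (Or.inr rfl) hnd' (fun hc => absurd rfl hc)

theorem alt_at_witness : coqproject_parse_alt ["@", "x"] = [("", ["x"])] := by
  unfold coqproject_parse_alt
  rw [show ((["@", "x"].map PySem.Str.strip).filter bKeep) = ["@", "x"] from by decide]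
  rw [show (["@", "x"] : List String) = "@" :: ["x"] from rfl, bGo_cons, if_pos (by decide),
    show (["x"].dropWhile (fun x => !PySem.Str.startswith x "@")) = [] from by decide, bGo_nil]
  decide

theorem coqproject_parse_changed : Claim_changed_coqproject_parse := by
  unfold Claim_changed_coqproject_parse
  refine ⟨by decide, by decide, by decide, ?_, by decide⟩
  exact alt_at_witness
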